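-- pv_equiv track=rewrite | github.com/jrbn/vlog | scripts/generate-queries-new.py | get_atoms
-- ===== SOURCE A (Python) =====
-- def get_atoms(body):
--     atoms = []
--     startIndex = 0
--     while True:
--         index = body.find(')', startIndex)
--         if index == -1:
--             break
--         atoms.append(body[startIndex:index+1])
--         startIndex = index+2
--     return atoms
-- ===== SOURCE B (Python) =====
-- def get_atoms(body):
--     atoms = []
--     cur = []
--     skip = False
--     for ch in body:
--         if skip:
--             skip = False
--             continue
--         cur.append(ch)
--         if ch == ')':
--             atoms.append(''.join(cur))
--             cur = []
--             skip = True
--     return atoms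
-- ===== Notes on version B (the rewrite author's own statement) =====
-- stated objective: idiomatic
-- what changed: Replaced A's repeated str.find/slice index loop by a single left-to-right character scan that accumulates the current chunk and uses a skip flag to drop the one character after each ')'.
import Mathlib
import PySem

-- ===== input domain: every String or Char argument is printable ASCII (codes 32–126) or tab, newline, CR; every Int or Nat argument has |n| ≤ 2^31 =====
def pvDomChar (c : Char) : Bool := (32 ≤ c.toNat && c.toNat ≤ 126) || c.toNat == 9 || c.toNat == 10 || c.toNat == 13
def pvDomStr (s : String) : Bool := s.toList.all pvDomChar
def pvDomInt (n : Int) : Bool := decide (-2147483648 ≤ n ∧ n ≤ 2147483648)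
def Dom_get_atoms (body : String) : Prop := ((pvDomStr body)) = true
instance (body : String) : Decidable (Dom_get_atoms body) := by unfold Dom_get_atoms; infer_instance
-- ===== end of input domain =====

-- B replaces A's repeated find/slice index loop by a single left-to-right character
-- fold carrying (atoms, current chunk, skip flag) (objective: idiomatic one-pass scan).

-- ===== PORT A =====
-- termination helper for A's loop: a successful find lies in [startIndex, length)
theorem pvFindFrom_close (cs : List Char) (k : Nat)
    (h : PySem.Chars.findFrom cs [')'] (k : Int) ≠ -1) :
    k ≤ cs.length ∧ (k : Int) ≤ PySem.Chars.findFrom cs [')'] (k : Int) ∧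
      (PySem.Chars.findFrom cs [')'] (k : Int)).toNat < cs.length := by
  have hk : k ≤ cs.length := by
    by_contra hk
    apply h
    simp only [PySem.Chars.findFrom]
    have : (cs.length : Int) < (k : Int) := by exact_mod_cast Nat.lt_of_not_le hk
    simp
    omega
  obtain ⟨h1, h2, _⟩ := PySem.Chars.findFrom_natCast_spec cs [')'] k hk h
  refine ⟨hk, h1, ?_⟩
  rcases h2 with ⟨t, ht⟩
  have hlt : (List.drop (PySem.Chars.findFrom cs [')'] (k : Int)).toNat cs).length = t.length + 1 := by
    rw [← ht]; simp
  have hlen := List.length_drop (l := cs) (i := (PySem.Chars.findFrom cs [')'] (k : Int)).toNat)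
  omega

-- the while-loop of A: index = body.find(')', startIndex); break on -1;
-- append body[startIndex:index+1]; startIndex = index+2
def getAtomsLoop (cs : List Char) (startIndex : Nat) (atoms : List String) : List String :=
  let index : Int := PySem.Chars.findFrom cs [')'] (startIndex : Int)
  if _h : index = -1 then atoms
  else getAtomsLoop cs (index.toNat + 2)
        (atoms ++ [String.ofList (PySem.Chars.slice cs (some (startIndex : Int)) (some (index + 1)))])
termination_by cs.length + 1 - startIndex
decreasing_by
  have := pvFindFrom_close cs startIndex _h
  omega

def get_atoms (body : String) : List String :=
  getAtomsLoop body.toList 0 []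

-- ===== PORT B =====
-- the body of B's for-loop, as a fold step over (atoms, cur, skip)
def getAtomsStep (st : List String × List Char × Bool) (ch : Char) :
    List String × List Char × Bool :=
  if st.2.2 then (st.1, st.2.1, false)
  else
    let cur := st.2.1 ++ [ch]
    if ch = ')' then (st.1 ++ [String.ofList cur], ([] : List Char), true)
    else (st.1, cur, false)

def get_atoms_alt (body : String) : List String :=
  (body.toList.foldl getAtomsStep ([], [], false)).1

-- ===== PRECONDITION & SPEC =====
def Spec_get_atoms (body : String) (out : List String) : Prop := out = get_atoms_alt body
instance (body : String) (out : List String) : Decidable (Spec_get_atoms body out) := by unfold Spec_get_atoms; infer_instance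

-- ===== CLAIM (what is proved, stated in full; the proofs are below) =====
def Claim_equal_get_atoms : Prop := ∀ (body : String), Dom_get_atoms body → Spec_get_atoms body (get_atoms body)

-- ===== LEMMAS AND PROOFS =====

-- common specification: split into atoms ending at ')', skipping one char after each ')'
def atomsSpec (cur : List Char) : List Char → List (List Char)
  | [] => []
  | c :: rest =>
      if c = ')' then (cur ++ [')']) :: atomsSpec [] rest.tail
      else atomsSpec (cur ++ [c]) rest
termination_by l => l.length
decreasing_by
  · simp [List.length_tail]
  · simp

theorem atomsSpec_nil (cur : List Char) : atomsSpec cur [] = [] := by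
  rw [atomsSpec.eq_def]

theorem atomsSpec_cons (cur : List Char) (c : Char) (rest : List Char) :
    atomsSpec cur (c :: rest)
      = if c = ')' then (cur ++ [')']) :: atomsSpec [] rest.tail
        else atomsSpec (cur ++ [c]) rest := by
  rw [atomsSpec.eq_def]

theorem atomsSpec_no_paren (cur : List Char) (l : List Char) (h : ')' ∉ l) :
    atomsSpec cur l = [] := by
  induction l generalizing cur with
  | nil => exact atomsSpec_nil cur
  | cons c rest ih =>
      rw [atomsSpec_cons]
      have hc : c ≠ ')' := by intro hc; exact h (by simp [hc])
      rw [if_neg hc]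
      exact ih _ (by intro hm; exact h (by simp [hm]))

theorem atomsSpec_split (cur pre rest : List Char) (h : ')' ∉ pre) :
    atomsSpec cur (pre ++ ')' :: rest) = (cur ++ pre ++ [')']) :: atomsSpec [] rest.tail := by
  induction pre generalizing cur with
  | nil => rw [List.nil_append, atomsSpec_cons]; simp
  | cons c pre' ih =>
      have hc : c ≠ ')' := by intro hc; exact h (by simp [hc])
      rw [List.cons_append, atomsSpec_cons, if_neg hc]
      rw [ih (cur ++ [c]) (by intro hm; exact h (by simp [hm]))]
      simp

theorem take_len_succ {α : Type} (l r : List α) (a : α) :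
    (l ++ a :: r).take (l.length + 1) = l ++ [a] := by
  induction l with
  | nil => simp
  | cons x xs ih => simp [ih]

theorem foldB_eq (l : List Char) (atoms : List String) (cur : List Char) :
    (l.foldl getAtomsStep (atoms, cur, false)).1
      = atoms ++ (atomsSpec cur l).map (fun a => String.ofList a) := by
  match l with
  | [] => simp [atomsSpec_nil]
  | c :: rest =>
      by_cases hc : c = ')'
      · subst hc
        have s1 : getAtomsStep (atoms, cur, false) ')'
            = (atoms ++ [String.ofList (cur ++ [')'])], ([] : List Char), true) := by
          simp [getAtomsStep]
        match rest with
        | [] =>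
            rw [List.foldl_cons, s1, List.foldl_nil, atomsSpec_cons]
            simp [atomsSpec_nil]
        | d :: r =>
            have s2 : getAtomsStep (atoms ++ [String.ofList (cur ++ [')'])], ([] : List Char), true) d
                = (atoms ++ [String.ofList (cur ++ [')'])], ([] : List Char), false) := by
              simp [getAtomsStep]
            rw [List.foldl_cons, s1, List.foldl_cons, s2,
                foldB_eq r (atoms ++ [String.ofList (cur ++ [')'])]) [], atomsSpec_cons]
            simp
      · have s0 : getAtomsStep (atoms, cur, false) c = (atoms, cur ++ [c], false) := by
          simp [getAtomsStep, hc]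
        rw [List.foldl_cons, s0, foldB_eq rest atoms (cur ++ [c]), atomsSpec_cons, if_neg hc]
termination_by l.length
decreasing_by
  · simp
  · simp

theorem loopA_eq (cs : List Char) (start : Nat) (atoms : List String)
    (hs : start ≤ cs.length + 1) :
    getAtomsLoop cs start atoms
      = atoms ++ (atomsSpec [] (cs.drop start)).map (fun a => String.ofList a) := by
  rw [getAtomsLoop]
  by_cases h : PySem.Chars.findFrom cs [')'] (start : Int) = -1
  · simp only [h, dif_pos]
    by_cases hlen : start ≤ cs.length
    · have hnp : ¬ [')'] <:+: cs.drop start :=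
        (PySem.Chars.findFrom_natCast_eq_neg_one_iff cs [')'] start hlen).1 h
      have hmem : ')' ∉ cs.drop start := by
        intro hm
        obtain ⟨s, t, hst⟩ := List.append_of_mem hm
        exact hnp ⟨s, t, by rw [hst]; simp⟩
      rw [atomsSpec_no_paren _ _ hmem]; simp
    · have hnil : cs.drop start = [] := List.drop_eq_nil_of_le (by omega)
      rw [hnil, atomsSpec_nil]; simp
  · obtain ⟨hk, h1, h3⟩ := pvFindFrom_close cs start h
    set idx := PySem.Chars.findFrom cs [')'] (start : Int) with hidx
    obtain ⟨_, hpre, hmin⟩ := PySem.Chars.findFrom_natCast_spec cs [')'] start hk h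
    set j := idx.toNat with hj
    have hjcast : idx = (j : Int) := by
      rw [hj]; exact (Int.toNat_of_nonneg (by omega)).symm
    have hsj : start ≤ j := by omega
    have hdropj : cs.drop j = ')' :: cs.drop (j + 1) := by
      rcases hpre with ⟨t, ht⟩
      have hd : cs.drop j = cs[j] :: cs.drop (j + 1) := List.drop_eq_getElem_cons h3
      rw [hd] at ht
      simp only [List.singleton_append] at ht
      injection ht with ha _
      rw [hd, ← ha]
    set pre := (cs.drop start).take (j - start) with hpredef
    have hprelen : pre.length = j - start := by
      rw [hpredef]; simp; omega
    have hsplit : cs.drop start = pre ++ ')' :: cs.drop (j + 1) := by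
      conv_lhs => rw [← List.take_append_drop (j - start) (cs.drop start)]
      rw [List.drop_drop]
      have h4 : start + (j - start) = j := by omega
      rw [h4, hdropj]
    have hnp : ')' ∉ pre := by
      intro hm
      obtain ⟨s, t, hst⟩ := List.append_of_mem hm
      have hslen : s.length + t.length + 1 = pre.length := by rw [hst]; simp; omega
      have h5 : (cs.drop start).drop s.length = cs.drop (start + s.length) := by
        rw [List.drop_drop]
      have hdec : cs.drop (start + s.length) = ')' :: (t ++ ')' :: cs.drop (j + 1)) := by
        rw [← h5, hsplit, hst, List.append_assoc, List.drop_left]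
        simp
      apply hmin (start + s.length) (by omega) (by omega)
      exact ⟨t ++ ')' :: cs.drop (j + 1), by rw [hdec]; simp⟩
    have hslice : PySem.Chars.slice cs (some (start : Int)) (some (idx + 1)) = pre ++ [')'] := by
      have hcast : idx + 1 = ((j + 1 : Nat) : Int) := by omega
      rw [hcast, PySem.Chars.slice_eq_listSlice, PySem.List.slice_natCast]
      have hlen1 : j + 1 - start = pre.length + 1 := by omega
      rw [hlen1, hsplit, take_len_succ]
    rw [dif_neg h, hslice, loopA_eq cs (j + 2) _ (by omega)]
    conv_rhs => rw [hsplit, atomsSpec_split _ _ _ hnp]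
    have htail : cs.drop (j + 2) = (cs.drop (j + 1)).tail := (List.tail_drop ..).symm
    rw [htail]
    simp
termination_by cs.length + 1 - start
decreasing_by
  have := pvFindFrom_close cs start h
  omega

-- ===== VERDICT (by name: the statement is the Claim_ definition above) =====
theorem get_atoms_spec : Claim_equal_get_atoms := by
  intro body _
  unfold Spec_get_atoms get_atoms get_atoms_alt
  rw [loopA_eq body.toList 0 [] (by omega), foldB_eq]
  simp
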